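-- pv_equiv track=rewrite | github.com/mankul/CodingPractice | DP/sum_1_2_4.py | func
-- ===== SOURCE A (Python) =====
-- d = {}
--
-- def func(n):
--     if n == 0 or n == 1 or n == 2:
--         return 1
--     elif n == 3:
--         return 2
--
--     if (n-1) not in d.keys():
--         d1 = func(n-1)
--     else:
--         d1 = d[n-1]
--     if (n-3) not in d.keys():
--         d3 = func(n-3)
--     else:
--         d3 = d[n-3]
--     if (n-4) not in d.keys():
--         d4 = func(n-4)
--
--     else:
--         d4 = d[n-4]
--
--     return (d1+d3+d4)
-- ===== SOURCE B (Python) =====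
-- def func(n):
--     if n == 3:
--         return 2
--     if n <= 2:
--         return 1
--     a, b, c, e = 1, 1, 1, 2  # f(k), f(k+1), f(k+2), f(k+3) with k = 0
--     for _ in range(4, n + 1):
--         a, b, c, e = b, c, e, e + b + a  # f(k+4) = f(k+3) + f(k+1) + f(k)
--     return e
-- ===== Notes on version B (the rewrite author's own statement) =====
-- stated objective: simpler
-- what changed: A's memo dict is never written, so A is plain triple recursion; B replaces it with a bottom-up four-variable sliding-window loop (intended as faster; a timing run could not confirm a ratio because A timed out at n=16 while B returned).
import Mathlib
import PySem

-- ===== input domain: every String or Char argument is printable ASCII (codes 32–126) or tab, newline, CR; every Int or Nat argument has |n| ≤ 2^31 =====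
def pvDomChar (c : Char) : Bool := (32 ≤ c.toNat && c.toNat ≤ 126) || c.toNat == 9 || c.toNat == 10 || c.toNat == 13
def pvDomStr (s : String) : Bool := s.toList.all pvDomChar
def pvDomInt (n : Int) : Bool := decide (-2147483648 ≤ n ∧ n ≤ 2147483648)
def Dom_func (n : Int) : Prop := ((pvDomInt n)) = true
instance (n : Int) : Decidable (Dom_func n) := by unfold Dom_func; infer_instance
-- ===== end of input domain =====

-- B replaces A's triple recursion (whose memo dict is never written) with a bottom-up four-variable sliding-window loop.

-- ===== PORT A =====
-- A's dict d stays {} forever (it is read but never assigned), so every 'not in d.keys()'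
-- test is true and A is the plain triple recursion below. For n < 0 the Python recursion
-- never reaches a base case (RecursionError); those inputs are outside Pre_func, and the
-- recursion is expressed on n.toNat (the 'if n < 0' guard only makes the port total there).
def funcRec : Nat → Int
  | 0 => 1
  | 1 => 1
  | 2 => 1
  | 3 => 2
  | (m + 4) => funcRec (m + 3) + funcRec (m + 1) + funcRec m

def func (n : Int) : Int := if n < 0 then 0 else funcRec n.toNat

-- ===== PORT B =====
-- state (a, b, c, e) = (f k, f (k+1), f (k+2), f (k+3)); one loop step shifts the window
def funcAltStep (st : Int × Int × Int × Int) (_ : Int) : Int × Int × Int × Int :=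
  (st.2.1, st.2.2.1, st.2.2.2, st.2.2.2 + st.2.1 + st.1)

def func_alt (n : Int) : Int :=
  if n = 3 then 2
  else if n ≤ 2 then 1
  else ((PySem.List.pyRange 4 (n + 1) 1).foldl funcAltStep (1, 1, 1, 2)).2.2.2

-- ===== PRECONDITION & SPEC =====
-- Pre_ excludes n < 0, where the Python A recurses forever (RecursionError) and returns nothing.
def Pre_func (n : Int) : Prop := 0 ≤ n
instance (n : Int) : Decidable (Pre_func n) := by unfold Pre_func; infer_instance
def pvWitness_func : Int := 7

def Spec_func (n : Int) (out : Int) : Prop := out = func_alt n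
instance (n : Int) (out : Int) : Decidable (Spec_func n out) := by unfold Spec_func; infer_instance

-- ===== CLAIM (what is proved, stated in full; the proofs are below) =====
def Claim_equal_func : Prop := ∀ (n : Int), Dom_func n → Pre_func n → Spec_func n (func n)

-- ===== LEMMAS AND PROOFS =====

-- the loop invariant: k ignored-element steps from the initial window reach window k
theorem foldl_funcAltStep_range (k : Nat) :
    (List.range k).foldl (fun st (_ : Nat) => funcAltStep st 0) (1, 1, 1, 2) =
      (funcRec k, funcRec (k + 1), funcRec (k + 2), funcRec (k + 3)) := by
  induction k with
  | zero => simp [funcRec]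
  | succ k ih =>
      rw [List.range_succ, List.foldl_append, ih]
      simp only [List.foldl_cons, List.foldl_nil, funcAltStep]
      show _ = (funcRec (k + 1), funcRec (k + 2), funcRec (k + 3), funcRec (k + 4))
      rw [show funcRec (k + 4) = funcRec (k + 3) + funcRec (k + 1) + funcRec k from rfl]

theorem func_alt_eq_funcRec (n : Int) (hn : 0 ≤ n) : func_alt n = funcRec n.toNat := by
  unfold func_alt
  by_cases h3 : n = 3
  · subst h3; rfl
  · rw [if_neg h3]
    by_cases h2 : n ≤ 2
    · rw [if_pos h2]
      interval_cases n <;> rfl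
    · rw [if_neg h2]
      have h4 : 4 ≤ n := by omega
      rw [PySem.List.pyRange_one]
      have hfold : ∀ (l : List Int), l.foldl funcAltStep (1, 1, 1, 2) =
          (List.range l.length).foldl (fun st (_ : Nat) => funcAltStep st 0) (1, 1, 1, 2) := by
        intro l
        induction l using List.reverseRecOn with
        | nil => rfl
        | append_singleton xs x ih =>
            rw [List.foldl_append, ih]
            simp [List.range_succ, funcAltStep]
      rw [hfold, List.length_map, List.length_range, foldl_funcAltStep_range]
      have : (n + 1 - 4).toNat + 3 = n.toNat := by omega
      rw [this]

theorem func_spec : Claim_equal_func := by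
  intro n _ hpre
  unfold Pre_func at hpre
  unfold Spec_func func
  rw [if_neg (by omega), func_alt_eq_funcRec n hpre]
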